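-- pv_equiv track=rewrite | github.com/jerryy33/pseudonym-se | clients/backend/util.py | generate_wildcard_list
-- ===== SOURCE A (Python) =====
-- from typing import List, Union
--
-- def generate_wildcard_list(words: Union[List, str]) -> List[List[str]]:
--     """Generates a wildcard list for a single word or list of words,
--     produces list of length n*2 +1 where n = len(word)
--         Example:
--         words = hallo
--         --> 1. *hallo
--             2. *allo
--             3. h*allo
--             4. h*llo
--             5. ha*llo
--             6. ha*lo
--             7. hal*lo
--             8. hal*o
--             9. hall*o
--            10. hall*
--            11. hallo*
--
--     Args:
--         words (Union[List, str]): a list of words or single word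
--
--     Returns:
--         List[List[str]]: a list of wildcard lists
--     """
--     if isinstance(words, str):
--         words = [words]
--         wildcard_list = [words]
--     else:
--         wildcard_list = []
--     for word in words:
--         keyword_wildcard_list = [word]
--         for i in range(0, len(word) + 1):
--             wildcard1 = word[:i] + "*" + word[i:]
--             keyword_wildcard_list.append(wildcard1)
--             if i == len(word):
--                 break
--             wildcard2 = word[:i] + "*" + word[i + 1 :]
--             keyword_wildcard_list.append(wildcard2)
--         wildcard_list.append(keyword_wildcard_list)
--     return wildcard_list
-- ===== SOURCE B (Python) =====
-- from typing import List, Union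
--
--
-- def generate_wildcard_list(words: Union[List, str]) -> List[List[str]]:
--     """Wildcard variants built from two precomputed lists (insertions and
--     replacements) interleaved, instead of one stateful loop with a break."""
--     if isinstance(words, str):
--         words = [words]
--         seed = [words]
--     else:
--         seed = []
--     return seed + [_word_wildcards(word) for word in words]
--
--
-- def _word_wildcards(word: str) -> List[str]:
--     n = len(word)
--     insertions = [word[:i] + "*" + word[i:] for i in range(n + 1)]
--     replacements = [word[:i] + "*" + word[i + 1:] for i in range(n)]
--     interleaved = [w for pair in zip(insertions, replacements) for w in pair]
--     return [word] + interleaved + [insertions[-1]]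
-- ===== Notes on version B (the rewrite author's own statement) =====
-- stated objective: alternative
-- what changed: A builds each word's list with one stateful loop that appends insertion then replacement variants and breaks at the last index; B precomputes two separate comprehension lists (all insertions, all replacements), interleaves them with zip, and concatenates [word] + interleaved + [last insertion], assembling the outer result as a list comprehension instead of accumulator appends.
import Mathlib
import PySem

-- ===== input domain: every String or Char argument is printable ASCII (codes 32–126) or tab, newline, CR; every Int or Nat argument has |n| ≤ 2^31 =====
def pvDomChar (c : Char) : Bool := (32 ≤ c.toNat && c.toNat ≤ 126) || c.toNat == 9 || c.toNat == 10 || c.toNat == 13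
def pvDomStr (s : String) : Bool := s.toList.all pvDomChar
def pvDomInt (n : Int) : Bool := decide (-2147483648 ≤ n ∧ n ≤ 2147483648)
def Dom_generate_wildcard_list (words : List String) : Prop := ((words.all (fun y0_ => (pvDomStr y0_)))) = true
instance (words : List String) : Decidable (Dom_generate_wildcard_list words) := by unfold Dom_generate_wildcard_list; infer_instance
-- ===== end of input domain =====

-- B differs from A by building insertion and replacement variants as two separate
-- lists and interleaving them, instead of A's single stateful loop with a break;
-- only the list-input branch is expressible under the List String signature.

-- ===== PORT A =====
-- A's inner 'for i in range(0, len(word)+1): … if i == len(word): break …' loop;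
-- word[:i] / word[i:] / word[i+1:] ported with PySem.List.slice on the code points.
def pvAInner (w : List Char) (n : Nat) (i : Nat) (acc : List String) : List String :=
  if i ≤ n then
    let wildcard1 := String.ofList (PySem.List.slice w none (some (i : Int)) ++ '*' :: PySem.List.slice w (some (i : Int)) none)
    if i = n then acc ++ [wildcard1]
    else
      let wildcard2 := String.ofList (PySem.List.slice w none (some (i : Int)) ++ '*' :: PySem.List.slice w (some ((i : Int) + 1)) none)
      pvAInner w n (i + 1) (acc ++ [wildcard1, wildcard2])
  else acc
termination_by n + 1 - i

def generate_wildcard_list (words : List String) : List (List String) :=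
  words.foldl (fun wildcard_list word =>
    wildcard_list ++ [pvAInner word.toList word.toList.length 0 [word]]) []

-- ===== PORT B =====
def pvInterleave : List String → List String → List String
  | a :: as, b :: bs => a :: b :: pvInterleave as bs
  | _, _ => []

def pvInsertions (w : List Char) : List String :=
  (List.range (w.length + 1)).map (fun (i : Nat) =>
    String.ofList (PySem.List.slice w none (some (i : Int)) ++ '*' :: PySem.List.slice w (some (i : Int)) none))

def pvReplacements (w : List Char) : List String :=
  (List.range w.length).map (fun (i : Nat) =>
    String.ofList (PySem.List.slice w none (some (i : Int)) ++ '*' :: PySem.List.slice w (some ((i : Int) + 1)) none))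

def pvWordWildcards (word : String) : List String :=
  [word] ++ pvInterleave (pvInsertions word.toList) (pvReplacements word.toList)
    ++ [(pvInsertions word.toList).getLastD ""]

def generate_wildcard_list_alt (words : List String) : List (List String) :=
  [] ++ words.map pvWordWildcards

-- ===== PRECONDITION & SPEC =====
def Spec_generate_wildcard_list (words : List String) (out : List (List String)) : Prop := out = generate_wildcard_list_alt words
instance (words : List String) (out : List (List String)) : Decidable (Spec_generate_wildcard_list words out) := by unfold Spec_generate_wildcard_list; infer_instance

-- ===== CLAIM (what is proved, stated in full; the proofs are below) =====
def Claim_equal_generate_wildcard_list : Prop := ∀ (words : List String), Dom_generate_wildcard_list words → Spec_generate_wildcard_list words (generate_wildcard_list words)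

-- ===== LEMMAS AND PROOFS =====
def pvIns (w : List Char) (i : Nat) : String := String.ofList (w.take i ++ '*' :: w.drop i)
def pvRep (w : List Char) (i : Nat) : String := String.ofList (w.take i ++ '*' :: w.drop (i + 1))

theorem pvSlice_drop_succ (w : List Char) (i : Nat) :
    PySem.List.slice w (some ((i : Int) + 1)) none = w.drop (i + 1) := by
  have : ((i : Int) + 1) = ((i + 1 : Nat) : Int) := by push_cast; ring
  rw [this, PySem.List.slice_from_natCast]

theorem pvAInner_eq (w : List Char) (n : Nat) :
    ∀ (k i : Nat) (acc : List String), i + k = n →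
      pvAInner w n i acc =
        acc ++ pvInterleave ((List.range' i k).map (pvIns w)) ((List.range' i k).map (pvRep w))
            ++ [pvIns w n] := by
  intro k
  induction k with
  | zero =>
    intro i acc h
    have hi : i = n := by omega
    rw [pvAInner]
    simp [hi, pvInterleave, pvIns, PySem.List.slice_to_natCast, PySem.List.slice_from_natCast]
  | succ k ih =>
    intro i acc h
    rw [pvAInner]
    have hle : i ≤ n := by omega
    have hne : i ≠ n := by omega
    rw [if_pos hle, if_neg hne, ih (i + 1) _ (by omega)]
    simp [List.range'_succ, pvInterleave, pvIns, pvRep,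
      PySem.List.slice_to_natCast, PySem.List.slice_from_natCast, pvSlice_drop_succ]

theorem pvInterleave_concat : ∀ (as bs : List String) (x : String),
    as.length = bs.length → pvInterleave (as ++ [x]) bs = pvInterleave as bs := by
  intro as
  induction as with
  | nil => intro bs x h; cases bs with
    | nil => simp [pvInterleave]
    | cons b bs => simp at h
  | cons a as ih => intro bs x h; cases bs with
    | nil => simp at h
    | cons b bs =>
      simp only [List.cons_append, pvInterleave]
      rw [ih bs x (by simpa using h)]

theorem pvIns_fun (w : List Char) (i : Nat) :
    String.ofList (PySem.List.slice w none (some (i : Int)) ++ '*' :: PySem.List.slice w (some (i : Int)) none) = pvIns w i := by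
  simp [pvIns, PySem.List.slice_to_natCast, PySem.List.slice_from_natCast]

theorem pvRep_fun (w : List Char) (i : Nat) :
    String.ofList (PySem.List.slice w none (some (i : Int)) ++ '*' :: PySem.List.slice w (some ((i : Int) + 1)) none) = pvRep w i := by
  simp [pvRep, PySem.List.slice_to_natCast, pvSlice_drop_succ]

theorem pvWord_eq (word : String) :
    pvAInner word.toList word.toList.length 0 [word] = pvWordWildcards word := by
  have hins : pvInsertions word.toList
      = (List.range' 0 word.toList.length).map (pvIns word.toList) ++ [pvIns word.toList word.toList.length] := by
    unfold pvInsertions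
    rw [List.range_succ, List.map_append, List.range_eq_range']
    exact congrArg₂ _ (List.map_congr_left (fun i _ => pvIns_fun word.toList i)) (by simp only [List.map_cons, List.map_nil, pvIns_fun])
  have hrep : pvReplacements word.toList = (List.range' 0 word.toList.length).map (pvRep word.toList) := by
    unfold pvReplacements
    rw [List.range_eq_range']
    exact List.map_congr_left (fun i _ => pvRep_fun word.toList i)
  rw [pvAInner_eq word.toList word.toList.length word.toList.length 0 [word] (by omega)]
  unfold pvWordWildcards
  rw [hins, hrep, pvInterleave_concat _ _ _ (by simp), List.getLastD_concat]

theorem pvFoldl_append_map (g : String → List String) :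
    ∀ (ws : List String) (acc : List (List String)),
      ws.foldl (fun acc w => acc ++ [g w]) acc = acc ++ ws.map g := by
  intro ws
  induction ws with
  | nil => intro acc; simp
  | cons w ws ih => intro acc; simp [List.foldl_cons, ih]

-- ===== VERDICT (by name: the statement is the Claim_ definition above) =====
theorem generate_wildcard_list_spec : Claim_equal_generate_wildcard_list := by
  intro words _
  unfold Spec_generate_wildcard_list generate_wildcard_list generate_wildcard_list_alt
  rw [pvFoldl_append_map]
  simp only [List.nil_append]
  exact List.map_congr_left (fun w _ => pvWord_eq w)
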